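-- pv_equiv track=rewrite | github.com/hypneum-lab/micro-kiki | scripts/eval_via_serving.py | _extract_completion
-- ===== SOURCE A (Python) =====
-- STOP_SEQUENCES = (
--     "\ndef ",
--     "\nclass ",
--     "\nif __name__",
--     "\nprint(",
--     "\n#",
--     "\n```",
--     "```",
--     "\nassert ",
-- )
--
-- def _extract_completion(raw: str, prompt: str) -> str:
--     text = raw
--     if text.startswith(prompt):
--         text = text[len(prompt):]
--     if text.lstrip().startswith("```"):
--         tail = text.split("\n", 1)[1] if "\n" in text else ""
--         text = tail
--         if text.lstrip().startswith("python\n"):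
--             text = text.lstrip()[len("python\n"):]
--     cut = len(text)
--     for s in STOP_SEQUENCES:
--         i = text.find(s)
--         if i != -1 and i < cut:
--             cut = i
--     text = text[:cut]
--     lines = text.split("\n")
--     if lines and lines[0].startswith("   ") and not lines[0].startswith("    "):
--         lines[0] = " " + lines[0]
--         text = "\n".join(lines)
--     return text
-- ===== SOURCE B (Python) =====
-- STOP_SEQUENCES = (
--     "\ndef ",
--     "\nclass ",
--     "\nif __name__",
--     "\nprint(",
--     "\n#",
--     "\n```",
--     "```",
--     "\nassert ",
-- )
--
-- def _extract_completion(raw: str, prompt: str) -> str: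
--     text = raw[len(prompt):] if raw.startswith(prompt) else raw
--     if text.lstrip().startswith("```"):
--         nl = text.find("\n")
--         text = text[nl + 1:] if nl != -1 else ""
--         stripped = text.lstrip()
--         if stripped.startswith("python\n"):
--             text = stripped[len("python\n"):]
--     i = 0
--     while i < len(text) and not any(text.startswith(s, i) for s in STOP_SEQUENCES):
--         i += 1
--     text = text[:i]
--     if text.startswith("   ") and not text.startswith("    "):
--         text = " " + text
--     return text
-- ===== Notes on version B (the rewrite author's own statement) =====
-- stated objective: alternative
-- what changed: The stop-sequence cut (eight independent text.find scans combined with a running min) becomes a single left-to-right scan that stops at the first position where any stop sequence starts; the code-fence tail is taken with one find+slice instead of split('\n',1), and the first-line indent patch tests the text's own prefix instead of splitting into lines and rejoining.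
import Mathlib
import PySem

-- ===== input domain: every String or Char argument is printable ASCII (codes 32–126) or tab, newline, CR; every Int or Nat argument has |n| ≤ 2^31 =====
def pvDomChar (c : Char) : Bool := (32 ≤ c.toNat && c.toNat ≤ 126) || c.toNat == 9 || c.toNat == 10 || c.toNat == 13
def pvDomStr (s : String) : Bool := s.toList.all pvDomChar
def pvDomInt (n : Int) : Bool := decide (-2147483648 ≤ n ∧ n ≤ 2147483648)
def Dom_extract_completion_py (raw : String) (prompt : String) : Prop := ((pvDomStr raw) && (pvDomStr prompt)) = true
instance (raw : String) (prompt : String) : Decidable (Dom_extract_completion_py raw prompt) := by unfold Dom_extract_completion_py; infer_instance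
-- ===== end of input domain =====

-- B replaces A's eight-pass min-of-find stop-sequence cut by one left-to-right scan, the split-based
-- fence strip by a find-based slice, and the split/join first-line indent patch by direct prefix tests
-- on the whole text (objective: alternative; not claimed faster).

-- ===== PORT A =====
def stopSeqs : List (List Char) :=
  ["\ndef ".toList, "\nclass ".toList, "\nif __name__".toList, "\nprint(".toList,
   "\n#".toList, "\n```".toList, "```".toList, "\nassert ".toList]

-- cut = len(text); for s in STOP_SEQUENCES: i = text.find(s); if i != -1 and i < cut: cut = i
def aCut (text : List Char) : Int :=
  stopSeqs.foldl
    (fun cut s =>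
      let i := PySem.Chars.find text s
      if i ≠ -1 ∧ i < cut then i else cut)
    (PySem.Chars.len text)

-- the code-fence stripping block of A (split-based)
def aFence (text : List Char) : List Char :=
  if PySem.Chars.startswith (PySem.Chars.lstrip text) "```".toList then
    -- tail = text.split("\n", 1)[1] if "\n" in text else ""   ([1] cannot raise: "\n" in text holds)
    let tail := if PySem.Chars.isIn "\n".toList text then
        (((PySem.Chars.splitMax? text "\n".toList 1).getD []).getD 1 []) else []
    if PySem.Chars.startswith (PySem.Chars.lstrip tail) "python\n".toList then
      (PySem.Chars.lstrip tail).drop ("python\n".toList.length)   -- slice with start = len("python\n") ≥ 0 is drop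
    else tail
  else text

-- lines = text.split("\n"); if lines and lines[0].startswith("   ") and not …: lines[0] = " " + lines[0]
def aPatch (text : List Char) : List Char :=
  let lines := (PySem.Chars.split? text "\n".toList).getD []
  if lines ≠ [] ∧ PySem.Chars.startswith (lines.getD 0 []) "   ".toList = true ∧
      ¬ PySem.Chars.startswith (lines.getD 0 []) "    ".toList = true then
    PySem.Chars.join "\n".toList (lines.set 0 (' ' :: lines.getD 0 []))
  else text

def extract_completion_py (raw : String) (prompt : String) : String :=
  let text := raw.toList
  -- if text.startswith(prompt): text = text[len(prompt):]   (slice with start = len(prompt) ≥ 0 is drop)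
  let text := if PySem.Chars.startswith text prompt.toList then text.drop prompt.toList.length else text
  let text := aFence text
  let text := PySem.List.slice text none (some (aCut text))   -- text[:cut]
  String.ofList (aPatch text)

-- ===== PORT B =====
-- any(text.startswith(s, i) for s in STOP_SEQUENCES)  at the current suffix
def bHit (cs : List Char) : Bool := stopSeqs.any (fun s => PySem.Chars.startswith cs s)

-- while i < len(text) and not any(...): i += 1 ; text = text[:i]   — built as the scanned prefix
def bScan : List Char → List Char
  | [] => []
  | c :: rest => if bHit (c :: rest) then [] else c :: bScan rest

-- the code-fence stripping block of B (find-based)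
def bFence (text : List Char) : List Char :=
  if PySem.Chars.startswith (PySem.Chars.lstrip text) "```".toList then
    let nl := PySem.Chars.find text "\n".toList
    let t2 := if nl ≠ -1 then PySem.List.slice text (some (nl + 1)) none else []  -- text[nl+1:]
    let stripped := PySem.Chars.lstrip t2
    if PySem.Chars.startswith stripped "python\n".toList then
      stripped.drop ("python\n".toList.length)
    else t2
  else text

-- if text.startswith("   ") and not text.startswith("    "): text = " " + text
def bPatch (text : List Char) : List Char :=
  if PySem.Chars.startswith text "   ".toList && !PySem.Chars.startswith text "    ".toList then
    ' ' :: text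
  else text

def extract_completion_py_alt (raw : String) (prompt : String) : String :=
  let text := if PySem.Chars.startswith raw.toList prompt.toList then
      raw.toList.drop prompt.toList.length else raw.toList
  String.ofList (bPatch (bScan (bFence text)))

-- ===== PRECONDITION & SPEC =====
def Spec_extract_completion_py (raw : String) (prompt : String) (out : String) : Prop := out = extract_completion_py_alt raw prompt
instance (raw : String) (prompt : String) (out : String) : Decidable (Spec_extract_completion_py raw prompt out) := by unfold Spec_extract_completion_py; infer_instance

-- ===== CLAIM (what is proved, stated in full; the proofs are below) =====
def Claim_equal_extract_completion_py : Prop := ∀ (raw : String) (prompt : String), Dom_extract_completion_py raw prompt → Spec_extract_completion_py raw prompt (extract_completion_py raw prompt)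


-- ===== LEMMAS AND PROOFS =====

-- functional single-separator split (proof-side model of PySem.Chars.splitOn.go)
def sp (a : Char) : List Char → List (List Char)
  | [] => [[]]
  | c :: r => if c = a then [] :: sp a r else (c :: (sp a r).headD []) :: (sp a r).tail

theorem sp_ne_nil (a : Char) (t : List Char) : sp a t ≠ [] := by
  cases t with
  | nil => simp [sp]
  | cons c r => simp only [sp]; split <;> simp

theorem go_eq (a : Char) (t : List Char) : ∀ (fuel : Nat) (cur : List Char) (acc : List (List Char)),
    t.length < fuel →
    PySem.Chars.splitOn.go [a] fuel t cur acc = acc.reverse ++ (sp a t).modifyHead (cur.reverse ++ ·) := by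
  induction t with
  | nil =>
    intro fuel cur acc h
    match fuel with
    | f + 1 => rw [PySem.Chars.splitOn.go.eq_2 _ _ _ _ (by simp)]; simp [sp]
  | cons c r ih =>
    intro fuel cur acc h
    match fuel, h with
    | f + 1, h =>
      rw [PySem.Chars.splitOn.go.eq_3]
      by_cases hc : c = a
      · subst hc
        rw [if_pos (by simp [List.isPrefixOf])]
        have hdrop : List.drop [c].length (c :: r) = r := by simp
        rw [hdrop, ih f [] (cur.reverse :: acc) (by simpa using Nat.lt_of_succ_lt_succ h)]
        obtain ⟨hd, tl, hsp⟩ := List.exists_cons_of_ne_nil (sp_ne_nil c r)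
        simp [sp, hsp]
      · rw [if_neg (by simp [List.isPrefixOf, beq_iff_eq]; intro hh; first | exact hc hh | exact hc hh.symm)]
        rw [ih f (c :: cur) acc (by simpa using Nat.lt_of_succ_lt_succ h)]
        obtain ⟨hd, tl, hsp⟩ := List.exists_cons_of_ne_nil (sp_ne_nil a r)
        simp [sp, hsp, hc]

theorem splitOn_eq (a : Char) (t : List Char) : PySem.Chars.splitOn t [a] = sp a t := by
  unfold PySem.Chars.splitOn
  rw [go_eq a t (t.length + 1) [] [] (Nat.lt_succ_self _)]
  obtain ⟨hd, tl, hsp⟩ := List.exists_cons_of_ne_nil (sp_ne_nil a t)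
  simp [hsp]

theorem sp_headD (a : Char) (t : List Char) : (sp a t).headD [] = t.takeWhile (· != a) := by
  induction t with
  | nil => simp [sp]
  | cons c r ih =>
    by_cases hc : c = a
    · subst hc; simp [sp, List.takeWhile]
    · have hb : (c != a) = true := bne_iff_ne.mpr hc
      simp [sp, hc, List.takeWhile, hb]
      rw [← List.headD_eq_head?_getD]; exact ih

theorem join_cons_head (sep : List Char) (c : Char) (h : List Char) (tl : List (List Char)) :
    PySem.Chars.join sep ((c :: h) :: tl) = c :: PySem.Chars.join sep (h :: tl) := by
  cases tl <;> simp [PySem.Chars.join_singleton, PySem.Chars.join_cons_cons]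

theorem join_sp (a : Char) (t : List Char) : PySem.Chars.join [a] (sp a t) = t := by
  induction t with
  | nil => simp [sp, PySem.Chars.join_singleton]
  | cons c r ih =>
    obtain ⟨hd, tl, hsp⟩ := List.exists_cons_of_ne_nil (sp_ne_nil a r)
    by_cases hc : c = a
    · subst hc
      rw [sp, if_pos rfl, hsp, PySem.Chars.join_cons_cons]
      rw [hsp] at ih; simpa using ih
    · rw [sp, if_neg hc, hsp]
      simp only [List.headD_cons, List.tail_cons]
      rw [join_cons_head, ← hsp, ih]

-- prefix test on the first line = prefix test on the whole text, for a newline-free pattern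
theorem isPrefixOf_takeWhile (p : List Char) (hp : ∀ c ∈ p, c ≠ '\n') :
    ∀ t : List Char, p.isPrefixOf (t.takeWhile (· != '\n')) = p.isPrefixOf t := by
  induction p with
  | nil => intro t; simp [List.isPrefixOf]
  | cons c p' ih =>
    intro t
    have hc : c ≠ '\n' := hp c (List.mem_cons_self ..)
    cases t with
    | nil => simp
    | cons d r =>
      by_cases hd : d = '\n'
      · subst hd
        simp only [List.takeWhile, bne_self_eq_false]
        simp [List.isPrefixOf, Bool.eq_false_iff, hc]
      · have hb : (d != '\n') = true := bne_iff_ne.mpr hd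
        simp only [List.takeWhile, hb]
        simp only [List.isPrefixOf, ih (fun x hx => hp x (List.mem_cons_of_mem _ hx)) r]


theorem go2_zero (a : Char) (fuel : Nat) (t cur : List Char) (acc : List (List Char)) :
    PySem.Chars.splitOnMax.go [a] fuel 0 t cur acc = ((cur.reverse ++ t) :: acc).reverse := by
  cases fuel with
  | zero => rw [PySem.Chars.splitOnMax.go.eq_1]
  | succ f =>
    cases t with
    | nil => rw [PySem.Chars.splitOnMax.go.eq_2 _ _ _ _ _ (by simp)]; simp
    | cons c r => rw [PySem.Chars.splitOnMax.go.eq_3, if_pos rfl]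

theorem go2_one (a : Char) (t : List Char) : ∀ (fuel : Nat) (cur : List Char) (acc : List (List Char)),
    t.length < fuel →
    PySem.Chars.splitOnMax.go [a] fuel 1 t cur acc = acc.reverse ++
      (if a ∈ t then [cur.reverse ++ t.takeWhile (· != a), (t.dropWhile (· != a)).tail]
       else [cur.reverse ++ t]) := by
  induction t with
  | nil =>
    intro fuel cur acc h
    match fuel with
    | f + 1 => rw [PySem.Chars.splitOnMax.go.eq_2 _ _ _ _ _ (by simp)]; simp
  | cons c r ih =>
    intro fuel cur acc h
    match fuel, h with
    | f + 1, h =>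
      rw [PySem.Chars.splitOnMax.go.eq_3, if_neg (by simp)]
      by_cases hc : c = a
      · subst hc
        rw [if_pos (by simp [List.isPrefixOf])]
        have hdrop : List.drop [c].length (c :: r) = r := by simp
        rw [hdrop, show (1 : Nat) - 1 = 0 from rfl, go2_zero]
        simp [List.takeWhile, List.dropWhile]
      · rw [if_neg (by simp [List.isPrefixOf, beq_iff_eq]; intro hh; first | exact hc hh | exact hc hh.symm)]
        rw [ih f (c :: cur) acc (by simpa using Nat.lt_of_succ_lt_succ h)]
        have hb : (c != a) = true := bne_iff_ne.mpr hc
        by_cases hm : a ∈ r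
        · simp [hm, hc, List.takeWhile, List.dropWhile, hb]
        · simp [hm, hc, Ne.symm hc, List.takeWhile, List.dropWhile, hb]

theorem find_go_singleton (a : Char) (t : List Char) : ∀ (k : Nat),
    PySem.Chars.find.go [a] t k =
      if a ∈ t then ((k + (t.takeWhile (· != a)).length : Nat) : Int) else -1 := by
  induction t with
  | nil => intro k; rw [PySem.Chars.find.go.eq_1]; simp
  | cons c r ih =>
    intro k
    rw [PySem.Chars.find.go.eq_2]
    by_cases hc : c = a
    · subst hc
      rw [if_pos (by simp [List.isPrefixOf])]
      simp [List.takeWhile]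
    · rw [if_neg (by simp [List.isPrefixOf, beq_iff_eq]; intro hh; first | exact hc hh | exact hc hh.symm)]
      have hb : (c != a) = true := bne_iff_ne.mpr hc
      rw [ih (k + 1)]
      by_cases hm : a ∈ r
      · rw [if_pos hm, if_pos (by simp [hm])]
        simp only [List.takeWhile, hb, List.length_cons]
        push_cast
        ring_nf
      · rw [if_neg hm, if_neg (by simp [hm, Ne.symm hc])]

theorem find_singleton (a : Char) (t : List Char) :
    PySem.Chars.find t [a] = if a ∈ t then (((t.takeWhile (· != a)).length : Nat) : Int) else -1 := by
  unfold PySem.Chars.find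
  rw [find_go_singleton]
  simp

theorem drop_takeWhile_length (p : Char → Bool) (l : List Char) :
    l.drop (l.takeWhile p).length = l.dropWhile p := by
  induction l with
  | nil => rfl
  | cons c r ih => by_cases h : p c <;> simp [List.takeWhile, List.dropWhile, h, ih]

theorem fence_eq (t : List Char) : aFence t = bFence t := by
  unfold aFence bFence
  have hnl : "\n".toList = ['\n'] := rfl
  by_cases hm : '\n' ∈ t
  · have hfind : PySem.Chars.find t "\n".toList =
        (((t.takeWhile (· != '\n')).length : Nat) : Int) := by
      rw [hnl, find_singleton, if_pos hm]
    have hIn : PySem.Chars.isIn "\n".toList t = true := by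
      rw [PySem.Chars.isIn_iff_infix, ← PySem.Chars.find_ne_neg_one_iff, hfind]
      intro hh
      omega
    have htail : ((PySem.Chars.splitMax? t "\n".toList 1).getD []).getD 1 [] =
        (t.dropWhile (· != '\n')).tail := by
      rw [hnl]
      unfold PySem.Chars.splitMax? PySem.Chars.splitOnMax
      rw [if_neg (by simp), if_neg (by omega), show Int.toNat 1 = 1 from rfl]
      rw [go2_one '\n' t (t.length + 1) [] [] (Nat.lt_succ_self _)]
      simp [hm]
    have hslice : PySem.List.slice t (some (PySem.Chars.find t "\n".toList + 1)) none =
        (t.dropWhile (· != '\n')).tail := by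
      rw [hfind, PySem.List.slice_from t (by omega)]
      have h1 : ((((t.takeWhile (· != '\n')).length : Nat) : Int) + 1).toNat =
          (t.takeWhile (· != '\n')).length + 1 := by omega
      rw [h1, ← List.drop_drop, drop_takeWhile_length, List.drop_one]
    have hne : PySem.Chars.find t "\n".toList ≠ -1 := by rw [hfind]; intro hh; omega
    rw [hIn]
    simp only [if_pos, if_true, hne, ne_eq, not_false_eq_true, hslice, htail]
  · have hfind : PySem.Chars.find t "\n".toList = -1 := by
      rw [hnl, find_singleton, if_neg hm]
    have hIn : PySem.Chars.isIn "\n".toList t = false := by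
      rw [← Bool.not_eq_true, PySem.Chars.isIn_iff_infix, ← PySem.Chars.find_ne_neg_one_iff, hfind]
      simp
    rw [hIn, hfind]
    simp

theorem bHit_iff (cs : List Char) : bHit cs = true ↔ ∃ s ∈ stopSeqs, s <+: cs := by
  simp [bHit, List.any_eq_true, PySem.Chars.startswith_iff]

def cutStep (text : List Char) (cut : Int) (s : List Char) : Int :=
  if PySem.Chars.find text s ≠ -1 ∧ PySem.Chars.find text s < cut then PySem.Chars.find text s else cut

theorem cut_inv (text : List Char) (stops : List (List Char)) : ∀ (init : Int),
    (stops.foldl (cutStep text) init ≤ init) ∧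
    (stops.foldl (cutStep text) init = init ∨
      (0 ≤ stops.foldl (cutStep text) init ∧
        ∃ s ∈ stops, PySem.Chars.find text s = stops.foldl (cutStep text) init)) ∧
    (∀ s ∈ stops, PySem.Chars.find text s = -1 ∨
      stops.foldl (cutStep text) init ≤ PySem.Chars.find text s) := by
  induction stops with
  | nil => intro init; exact ⟨le_refl _, Or.inl rfl, by simp⟩
  | cons s rest ih =>
    intro init
    simp only [List.foldl_cons]
    obtain ⟨h1, h2, h3⟩ := ih (cutStep text init s)
    by_cases hcond : PySem.Chars.find text s ≠ -1 ∧ PySem.Chars.find text s < init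
    · have hstep : cutStep text init s = PySem.Chars.find text s := if_pos hcond
      rw [hstep] at h1 h2 h3 ⊢
      have hpos : 0 ≤ PySem.Chars.find text s := by
        rcases Classical.em (0 ≤ PySem.Chars.find text s) with hge | hlt
        · exact hge
        · exact absurd (le_antisymm (by omega) (PySem.Chars.neg_one_le_find text s)) hcond.1
      refine ⟨by omega, ?_, ?_⟩
      · rcases h2 with h2 | ⟨h2a, s', hs', h2b⟩
        · exact Or.inr ⟨by omega, s, List.mem_cons_self .., h2.symm⟩
        · exact Or.inr ⟨h2a, s', List.mem_cons_of_mem _ hs', h2b⟩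
      · intro s' hs'
        rcases List.mem_cons.mp hs' with rfl | hs'
        · exact Or.inr h1
        · exact h3 s' hs'
    · have hstep : cutStep text init s = init := if_neg hcond
      rw [hstep] at h1 h2 h3 ⊢
      refine ⟨h1, ?_, ?_⟩
      · rcases h2 with h | ⟨ha, s', hs', hb⟩
        · exact Or.inl h
        · exact Or.inr ⟨ha, s', List.mem_cons_of_mem _ hs', hb⟩
      intro s' hs'
      rcases List.mem_cons.mp hs' with rfl | hs'
      · rcases Classical.em (PySem.Chars.find text s' = -1) with hn | hn
        · exact Or.inl hn
        · exact Or.inr (by push_neg at hcond; exact le_trans h1 (hcond hn))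
      · exact h3 s' hs'

theorem bScan_take (t : List Char) : ∀ (n : Nat), n ≤ t.length →
    (∀ i < n, bHit (t.drop i) = false) →
    (n = t.length ∨ bHit (t.drop n) = true) →
    bScan t = t.take n := by
  induction t with
  | nil =>
    intro n hn _ _
    have h0 : n = 0 := by simpa using hn
    subst h0
    rfl
  | cons c r ih =>
    intro n hn hlo hhi
    by_cases hb : bHit (c :: r) = true
    · have hn0 : n = 0 := by
        by_contra hne
        have := hlo 0 (by omega)
        simp [hb] at this
      subst hn0
      simp [bScan, hb]
    · have hn0 : n ≠ 0 := by
        intro h0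
        subst h0
        rcases hhi with h | h
        · simp at h
        · exact hb h
      obtain ⟨m, rfl⟩ := Nat.exists_eq_succ_of_ne_zero hn0
      rw [bScan, if_neg hb, List.take_succ_cons]
      congr 1
      refine ih m (by simpa using hn) (fun i hi => ?_) ?_
      · have := hlo (i + 1) (by omega)
        simpa using this
      · rcases hhi with h | h
        · exact Or.inl (by simpa using h)
        · exact Or.inr (by simpa using h)

theorem cut_eq (t : List Char) : PySem.List.slice t none (some (aCut t)) = bScan t := by
  obtain ⟨h1, h2, h3⟩ := cut_inv t stopSeqs (PySem.Chars.len t)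
  have hlen : PySem.Chars.len t = (t.length : Int) := PySem.Chars.len_eq t
  have haCut : aCut t = stopSeqs.foldl (cutStep t) (PySem.Chars.len t) := rfl
  rw [← haCut] at h1 h2 h3
  have hpos : 0 ≤ aCut t := by
    rcases h2 with h | ⟨h, _⟩
    · rw [h, hlen]; positivity
    · exact h
  have hle : aCut t ≤ (t.length : Int) := by rw [← hlen]; exact h1
  rw [PySem.List.slice_to t hpos]
  refine (bScan_take t (aCut t).toNat (by omega) (fun i hi => ?_) ?_).symm
  · by_contra hcontra
    rw [Bool.not_eq_false, bHit_iff] at hcontra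
    obtain ⟨s, hs, hpre⟩ := hcontra
    have hinf : s <:+: t := by
      obtain ⟨rest, hrest⟩ := hpre
      exact ⟨t.take i, rest, by rw [List.append_assoc, hrest, List.take_append_drop]⟩
    have hne : PySem.Chars.find t s ≠ -1 := by
      rw [PySem.Chars.find_ne_neg_one_iff]
      exact hinf
    have hnn : 0 ≤ PySem.Chars.find t s := by
      rw [PySem.Chars.find_nonneg_iff]
      exact hinf
    have hspec := PySem.Chars.find_spec hnn
    have hfle : (PySem.Chars.find t s).toNat ≤ i := by
      by_contra hgt
      exact hspec.2 i (by omega) hpre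
    rcases h3 s hs with h | h
    · exact hne h
    · omega
  · rcases h2 with h | ⟨_, s, hs, hfind⟩
    · left
      rw [h, hlen]
      omega
    · right
      rw [bHit_iff]
      have hnn : 0 ≤ PySem.Chars.find t s := by omega
      exact ⟨s, hs, by rw [← hfind]; exact (PySem.Chars.find_spec hnn).1⟩

set_option maxRecDepth 8192 in
theorem patch_eq (t : List Char) : aPatch t = bPatch t := by
  obtain ⟨hd, tl, hsp⟩ := List.exists_cons_of_ne_nil (sp_ne_nil '\n' t)
  have hhd : hd = List.takeWhile (fun c => c != '\n') t := by
    have h := sp_headD '\n' t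
    rw [hsp] at h
    simpa using h
  have h3 : PySem.Chars.startswith hd "   ".toList = PySem.Chars.startswith t "   ".toList := by
    rw [hhd]
    exact isPrefixOf_takeWhile _ (by simp) t
  have h4 : PySem.Chars.startswith hd "    ".toList = PySem.Chars.startswith t "    ".toList := by
    rw [hhd]
    exact isPrefixOf_takeWhile _ (by simp) t
  have hnl : "\n".toList = ['\n'] := rfl
  have hsplit : (PySem.Chars.split? t "\n".toList).getD [] = sp '\n' t := by
    rw [hnl]
    simp [PySem.Chars.split?, splitOn_eq]
  have hj : PySem.Chars.join ['\n'] ((' ' :: hd) :: tl) = ' ' :: t := by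
    rw [join_cons_head, ← hsp, join_sp]
  unfold aPatch bPatch
  rw [hsplit, hsp, hnl]
  simp only [List.getD_cons_zero, List.set_cons_zero, h3, h4, ne_eq, reduceCtorEq,
    not_false_eq_true, true_and, hj]
  by_cases hA : PySem.Chars.startswith t "   ".toList = true
  · by_cases hB : PySem.Chars.startswith t "    ".toList = true
    · simp [hA, hB]
    · simp [hA, hB]
  · simp [hA]

-- ===== VERDICT (by name: the statement is the Claim_ definition above) =====
theorem extract_completion_py_spec : Claim_equal_extract_completion_py := by
  intro raw prompt _
  unfold Spec_extract_completion_py extract_completion_py extract_completion_py_alt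
  simp only [fence_eq, cut_eq, patch_eq]
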